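-- pv_equiv track=rewrite | github.com/whmc76/RoughCut | src/roughcut/edit/decisions.py | _looks_like_retake_match
-- ===== SOURCE A (Python) =====
-- _RETAKE_MIN_PREFIX_LEN = 4
--
-- def _looks_like_retake_match(fragment_compact: str, next_compact: str) -> bool:
--     if not fragment_compact or not next_compact:
--         return False
--     if len(next_compact) < len(fragment_compact) + 3:
--         return False
--     prefix_len = 0
--     for left, right in zip(fragment_compact, next_compact):
--         if left != right:
--             break
--         prefix_len += 1
--     return prefix_len >= min(len(fragment_compact), 8) and prefix_len >= _RETAKE_MIN_PREFIX_LEN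
-- ===== SOURCE B (Python) =====
-- _RETAKE_MIN_PREFIX_LEN = 4
--
-- def _looks_like_retake_match(fragment_compact: str, next_compact: str) -> bool:
--     if not fragment_compact or not next_compact:
--         return False
--     if len(next_compact) < len(fragment_compact) + 3:
--         return False
--     k = min(len(fragment_compact), 8)
--     return k >= _RETAKE_MIN_PREFIX_LEN and next_compact.startswith(fragment_compact[:k])
-- ===== Notes on version B (the rewrite author's own statement) =====
-- stated objective: simpler
-- what changed: Replaced the character-by-character prefix-length accumulator loop with a single slice-prefix test: since the loop's count was only compared against min(len(fragment),8) and 4, B just checks k>=4 and next.startswith(fragment[:k]).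
import Mathlib
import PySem

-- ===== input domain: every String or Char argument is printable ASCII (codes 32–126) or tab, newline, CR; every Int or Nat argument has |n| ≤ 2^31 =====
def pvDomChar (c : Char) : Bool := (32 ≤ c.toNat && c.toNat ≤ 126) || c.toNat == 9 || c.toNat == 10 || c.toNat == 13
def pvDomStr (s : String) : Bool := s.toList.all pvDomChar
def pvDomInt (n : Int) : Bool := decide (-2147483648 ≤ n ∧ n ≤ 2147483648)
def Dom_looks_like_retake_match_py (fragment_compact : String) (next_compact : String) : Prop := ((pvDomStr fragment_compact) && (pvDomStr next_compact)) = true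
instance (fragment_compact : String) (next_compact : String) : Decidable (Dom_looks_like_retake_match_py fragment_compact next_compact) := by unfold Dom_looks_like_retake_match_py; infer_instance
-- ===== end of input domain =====

-- B replaces A's character-counting loop by a single slice-prefix test (k>=4 and startswith(fragment[:k])); equivalence proved on all inputs.

-- ===== PORT A =====
-- the 'for left, right in zip(...): if left != right: break; prefix_len += 1' loop
def pvPrefixLenA : List Char → List Char → Nat
  | l :: ls, r :: rs => if l ≠ r then 0 else pvPrefixLenA ls rs + 1
  | _, _ => 0

def looks_like_retake_match_py (fragment_compact : String) (next_compact : String) : Bool :=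
  if fragment_compact.toList = [] ∨ next_compact.toList = [] then false
  else if next_compact.toList.length < fragment_compact.toList.length + 3 then false
  else
    let prefix_len := pvPrefixLenA fragment_compact.toList next_compact.toList
    decide (prefix_len ≥ min fragment_compact.toList.length 8 ∧ prefix_len ≥ 4)

-- ===== PORT B =====
def looks_like_retake_match_py_alt (fragment_compact : String) (next_compact : String) : Bool :=
  if fragment_compact.toList = [] ∨ next_compact.toList = [] then false
  else if next_compact.toList.length < fragment_compact.toList.length + 3 then false
  else
    let k := min fragment_compact.toList.length 8
    decide (k ≥ 4) && (fragment_compact.toList.take k).isPrefixOf next_compact.toList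

-- ===== PRECONDITION & SPEC =====
def Spec_looks_like_retake_match_py (fragment_compact : String) (next_compact : String) (out : Bool) : Prop := out = looks_like_retake_match_py_alt fragment_compact next_compact
instance (fragment_compact : String) (next_compact : String) (out : Bool) : Decidable (Spec_looks_like_retake_match_py fragment_compact next_compact out) := by unfold Spec_looks_like_retake_match_py; infer_instance

-- ===== CLAIM (what is proved, stated in full; the proofs are below) =====
def Claim_equal_looks_like_retake_match_py : Prop := ∀ (fragment_compact : String) (next_compact : String), Dom_looks_like_retake_match_py fragment_compact next_compact → Spec_looks_like_retake_match_py fragment_compact next_compact (looks_like_retake_match_py fragment_compact next_compact)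

-- ===== LEMMAS AND PROOFS =====
theorem pvPrefixLenA_le (l r : List Char) : pvPrefixLenA l r ≤ l.length := by
  induction l generalizing r with
  | nil => simp [pvPrefixLenA]
  | cons a ls ih =>
    cases r with
    | nil => simp [pvPrefixLenA]
    | cons b rs =>
      simp only [pvPrefixLenA]
      split
      · simp
      · simpa using Nat.succ_le_succ (ih rs)

theorem take_isPrefixOf_iff (l r : List Char) (k : Nat) (hk : k ≤ l.length) :
    (l.take k).isPrefixOf r = true ↔ k ≤ pvPrefixLenA l r := by
  induction l generalizing r k with
  | nil => simp at hk; subst hk; simp [pvPrefixLenA]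
  | cons a ls ih =>
    cases k with
    | zero => simp
    | succ j =>
      cases r with
      | nil => simp [pvPrefixLenA]
      | cons b rs =>
        simp only [List.take_succ_cons, List.isPrefixOf, pvPrefixLenA]
        by_cases hab : a = b
        · subst hab
          simp only [ne_eq, not_true_eq_false, if_false, beq_self_eq_true, Bool.true_and]
          rw [ih rs j (by simpa using hk)]
          omega
        · simp [hab]

-- ===== VERDICT (by name: the statement is the Claim_ definition above) =====
theorem looks_like_retake_match_py_spec : Claim_equal_looks_like_retake_match_py := by
  intro f n _
  unfold Spec_looks_like_retake_match_py looks_like_retake_match_py looks_like_retake_match_py_alt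
  split
  · rfl
  · split
    · rfl
    · simp only
      have hle : min f.toList.length 8 ≤ f.toList.length := Nat.min_le_left _ _
      have hp := pvPrefixLenA_le f.toList n.toList
      rw [Bool.eq_iff_iff]
      simp only [decide_eq_true_eq, Bool.and_eq_true,
        take_isPrefixOf_iff f.toList n.toList _ hle]
      omega
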